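-- pv_equiv track=rewrite | github.com/joestalker1/leetcode | src/main/scala/CheckIfAnOriginalStringExistsGivenTwoEncodedStrings.py | possiblyEquals
-- ===== SOURCE A (Python) =====
-- from functools import lru_cache
--
-- def possiblyEquals(s1: str, s2: str) -> bool:
--     if s1 == s2:
--         return True
--
--     @lru_cache(None)
--     def dfs(i, j, diff):
--         if i >= len(s1) and j >= len(s2) and diff == 0:
--             return True
--         if i < len(s1):
--             if s1[i].isnumeric():
--                 cnt = 0
--                 val = 0
--                 while i + cnt < len(s1) and cnt < 3 and s1[i + cnt].isnumeric():
--                     val = 10 * val + int(s1[i + cnt])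
--                     cnt += 1
--                     if dfs(i + cnt, j, diff - val):
--                         return True
--             else:
--                 if diff > 0:
--                     if dfs(i + 1, j, diff - 1):
--                         return True
--                 elif diff == 0 and j < len(s2) and s1[i] == s2[j]:
--                     if dfs(i + 1, j + 1, diff):
--                         return True
--         if j < len(s2):
--             if s2[j].isnumeric():
--                 cnt = 0
--                 val = 0
--                 while j + cnt < len(s2) and cnt < 3 and s2[j + cnt].isnumeric():
--                     val = 10 * val + int(s2[j + cnt])
--                     cnt += 1
--                     if dfs(i, j + cnt, diff + val):
--                         return True
--             elif diff < 0 and dfs(i, j + 1, diff + 1):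
--                 return True
--         return False
--
--     return dfs(0, 0, 0)
-- ===== SOURCE B (Python) =====
-- def possiblyEquals(s1: str, s2: str) -> bool:
--     if s1 == s2:
--         return True
--     n1, n2 = len(s1), len(s2)
--
--     def runs(s, i):
--         out = []
--         cnt = 0
--         val = 0
--         while i + cnt < len(s) and cnt < 3 and s[i + cnt].isnumeric():
--             val = 10 * val + int(s[i + cnt])
--             cnt += 1
--             out.append((cnt, val))
--         return out
--
--     def successors(state):
--         i, j, d = state
--         out = []
--         if i < n1:
--             if s1[i].isnumeric():
--                 for (c, v) in runs(s1, i):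
--                     out.append((i + c, j, d - v))
--             elif d > 0:
--                 out.append((i + 1, j, d - 1))
--             elif d == 0 and j < n2 and s1[i] == s2[j]:
--                 out.append((i + 1, j + 1, d))
--         if j < n2:
--             if s2[j].isnumeric():
--                 for (c, v) in runs(s2, j):
--                     out.append((i, j + c, d + v))
--             elif d < 0:
--                 out.append((i, j + 1, d + 1))
--         return out
--
--     reached = {(0, 0, 0)}
--     frontier = [(0, 0, 0)]
--     # every move advances i + j by at least 1, so n1 + n2 + 1 rounds reach a fixpoint
--     for _ in range(n1 + n2 + 1):
--         new = []
--         for st in frontier: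
--             for nxt in successors(st):
--                 if nxt not in reached:
--                     reached.add(nxt)
--                     new.append(nxt)
--         frontier = new
--     return (n1, n2, 0) in reached
-- ===== Notes on version B (the rewrite author's own statement) =====
-- stated objective: alternative
-- what changed: Replaced the memoised top-down dfs(i,j,diff) recursion by an iterative forward BFS that maintains a visited set and frontier of reachable (i,j,diff) states and answers whether the accepting state (len(s1),len(s2),0) becomes reachable.
import Mathlib
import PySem

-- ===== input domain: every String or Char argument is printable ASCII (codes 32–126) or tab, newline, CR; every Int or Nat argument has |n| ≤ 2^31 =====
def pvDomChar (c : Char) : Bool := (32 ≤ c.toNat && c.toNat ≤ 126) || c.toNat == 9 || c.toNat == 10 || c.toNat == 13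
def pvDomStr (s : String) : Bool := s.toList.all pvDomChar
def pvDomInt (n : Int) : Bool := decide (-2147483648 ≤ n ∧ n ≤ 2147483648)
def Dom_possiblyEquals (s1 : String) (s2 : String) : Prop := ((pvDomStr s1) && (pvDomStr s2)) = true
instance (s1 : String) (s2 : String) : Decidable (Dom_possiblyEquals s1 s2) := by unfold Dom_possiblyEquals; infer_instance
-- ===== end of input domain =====

-- B replaces A's memoised top-down recursion by a forward iterative BFS over reachable
-- (i, j, diff) states (objective: alternative decomposition, same answer, no recursion).

-- ===== PORT A =====
-- `c.isnumeric()` / `int(c)` for one character; exact on the printable-ASCII domain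
def pvIsNum (c : Char) : Bool := 48 ≤ c.toNat && c.toNat ≤ 57
def pvDigit (c : Char) : Int := (c.toNat : Int) - 48

-- the inner `while` both Pythons contain verbatim: the successive (cnt, val) pairs, in order
def pyRuns (l : List Char) (i : Nat) (cnt : Nat) (val : Int) : List (Nat × Int) :=
  if h : i + cnt < l.length ∧ cnt < 3 ∧ pvIsNum (l.getD (i + cnt) ' ') = true then
    (cnt + 1, 10 * val + pvDigit (l.getD (i + cnt) ' ')) ::
      pyRuns l i (cnt + 1) (10 * val + pvDigit (l.getD (i + cnt) ' '))
  else []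
  termination_by 3 - cnt
  decreasing_by omega

-- A's dfs; the fuel only makes the recursion structural (any fuel > (len+len)-(i+j) suffices,
-- every recursive call advances i + j) — the `while … if dfs(...): return True` loop is the
-- `any` over the same (cnt, val) pairs in the same order
def dfsA (l1 l2 : List Char) : Nat → Nat → Nat → Int → Bool
  | 0, _, _, _ => false
  | fuel + 1, i, j, d =>
    if l1.length ≤ i ∧ l2.length ≤ j ∧ d = 0 then true
    else
      ((if i < l1.length then
          if pvIsNum (l1.getD i ' ') then
            (pyRuns l1 i 0 0).any (fun p => dfsA l1 l2 fuel (i + p.1) j (d - p.2))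
          else if 0 < d then dfsA l1 l2 fuel (i + 1) j (d - 1)
          else if d = 0 ∧ j < l2.length ∧ l1.getD i ' ' = l2.getD j ' ' then
            dfsA l1 l2 fuel (i + 1) (j + 1) d
          else false
        else false) ||
       (if j < l2.length then
          if pvIsNum (l2.getD j ' ') then
            (pyRuns l2 j 0 0).any (fun p => dfsA l1 l2 fuel i (j + p.1) (d + p.2))
          else if d < 0 then dfsA l1 l2 fuel i (j + 1) (d + 1)
          else false
        else false))

def possiblyEquals (s1 : String) (s2 : String) : Bool :=
  if s1 = s2 then true
  else dfsA s1.toList s2.toList (s1.toList.length + s2.toList.length + 1) 0 0 0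

-- ===== PORT B =====
-- Source B's `successors(state)`
def succsB (l1 l2 : List Char) (i j : Nat) (d : Int) : List (Nat × Nat × Int) :=
  (if i < l1.length then
     if pvIsNum (l1.getD i ' ') then (pyRuns l1 i 0 0).map (fun p => (i + p.1, j, d - p.2))
     else if 0 < d then [(i + 1, j, d - 1)]
     else if d = 0 ∧ j < l2.length ∧ l1.getD i ' ' = l2.getD j ' ' then [(i + 1, j + 1, d)]
     else []
   else []) ++
  (if j < l2.length then
     if pvIsNum (l2.getD j ' ') then (pyRuns l2 j 0 0).map (fun p => (i, j + p.1, d + p.2))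
     else if d < 0 then [(i, j + 1, d + 1)]
     else []
   else [])

-- `if nxt not in reached: reached.add(nxt); new.append(nxt)`
def pvAdd (ac : List (Nat × Nat × Int) × List (Nat × Nat × Int)) (x : Nat × Nat × Int) :
    List (Nat × Nat × Int) × List (Nat × Nat × Int) :=
  if x ∈ ac.1 then ac else (ac.1 ++ [x], ac.2 ++ [x])

-- one round of the BFS loop body: expand the whole frontier, collect the fresh states
def bfsRound (l1 l2 : List Char) (ac : List (Nat × Nat × Int) × List (Nat × Nat × Int)) :
    List (Nat × Nat × Int) × List (Nat × Nat × Int) :=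
  ac.2.foldl (fun a st => (succsB l1 l2 st.1 st.2.1 st.2.2).foldl pvAdd a) (ac.1, [])

def possiblyEquals_alt (s1 : String) (s2 : String) : Bool :=
  if s1 = s2 then true
  else
    let l1 := s1.toList
    let l2 := s2.toList
    let res := (List.range (l1.length + l2.length + 1)).foldl (fun a _ => bfsRound l1 l2 a)
        ([((0 : Nat), (0 : Nat), (0 : Int))], [((0 : Nat), (0 : Nat), (0 : Int))])
    decide ((l1.length, l2.length, (0 : Int)) ∈ res.1)

-- ===== PRECONDITION & SPEC =====
def Spec_possiblyEquals (s1 : String) (s2 : String) (out : Bool) : Prop := out = possiblyEquals_alt s1 s2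
instance (s1 : String) (s2 : String) (out : Bool) : Decidable (Spec_possiblyEquals s1 s2 out) := by unfold Spec_possiblyEquals; infer_instance

-- ===== CLAIM (what is proved, stated in full; the proofs are below) =====
def Claim_equal_possiblyEquals : Prop := ∀ (s1 : String) (s2 : String), Dom_possiblyEquals s1 s2 → Spec_possiblyEquals s1 s2 (possiblyEquals s1 s2)

-- ===== LEMMAS AND PROOFS =====

lemma pyRuns_mem (l : List Char) (i cnt : Nat) (val : Int) :
    ∀ p ∈ pyRuns l i cnt val, cnt < p.1 ∧ i + p.1 ≤ l.length := by
  fun_induction pyRuns l i cnt val with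
  | case1 cnt val h ih =>
    intro p hp
    rcases List.mem_cons.1 hp with rfl | hp
    · simp; omega
    · have := ih p hp; omega
  | case2 => simp

-- the step relation of both programs: B's successor list, A's branch structure
lemma dfsA_succ (l1 l2 : List Char) (fuel i j : Nat) (d : Int) :
    dfsA l1 l2 (fuel + 1) i j d =
      (if l1.length ≤ i ∧ l2.length ≤ j ∧ d = 0 then true
       else (succsB l1 l2 i j d).any (fun t => dfsA l1 l2 fuel t.1 t.2.1 t.2.2)) := by
  rw [dfsA, succsB]
  split
  · rfl
  · rw [List.any_append]
    split_ifs <;> simp [List.any_map, Function.comp_def]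

lemma succsB_level (l1 l2 : List Char) (i j : Nat) (d : Int) :
    ∀ t ∈ succsB l1 l2 i j d, i + j < t.1 + t.2.1 := by
  intro t ht
  rw [succsB, List.mem_append] at ht
  rcases ht with ht | ht <;>
  · split_ifs at ht <;> simp [List.mem_map] at ht
    all_goals first
      | (obtain ⟨a, b, hp, rfl⟩ := ht
         have := pyRuns_mem _ _ _ _ (a, b) hp
         simp at this ⊢
         omega)
      | (subst ht
         simp
         try omega)

lemma succsB_bounds (l1 l2 : List Char) (i j : Nat) (d : Int)
    (hi : i ≤ l1.length) (hj : j ≤ l2.length) :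
    ∀ t ∈ succsB l1 l2 i j d, t.1 ≤ l1.length ∧ t.2.1 ≤ l2.length := by
  intro t ht
  rw [succsB, List.mem_append] at ht
  rcases ht with ht | ht <;>
  · split_ifs at ht <;> simp [List.mem_map] at ht
    all_goals first
      | (obtain ⟨a, b, hp, rfl⟩ := ht
         have := pyRuns_mem _ _ _ _ (a, b) hp
         simp at this ⊢
         omega)
      | (subst ht
         simp
         try omega)

-- reachability along succsB, head-recursive
inductive PvReach (l1 l2 : List Char) : (Nat × Nat × Int) → (Nat × Nat × Int) → Prop
  | refl (s : Nat × Nat × Int) : PvReach l1 l2 s s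
  | head {s t u : Nat × Nat × Int} :
      t ∈ succsB l1 l2 s.1 s.2.1 s.2.2 → PvReach l1 l2 t u → PvReach l1 l2 s u

lemma PvReach.snoc {l1 l2 : List Char} {s t u : Nat × Nat × Int}
    (h : PvReach l1 l2 s t) (hu : u ∈ succsB l1 l2 t.1 t.2.1 t.2.2) : PvReach l1 l2 s u := by
  induction h with
  | refl s => exact PvReach.head hu (PvReach.refl u)
  | head hst _ ih => exact PvReach.head hst (ih hu)

lemma dfsA_imp_reach (l1 l2 : List Char) :
    ∀ fuel i j (d : Int), i ≤ l1.length → j ≤ l2.length → dfsA l1 l2 fuel i j d = true →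
      PvReach l1 l2 (i, j, d) (l1.length, l2.length, 0) := by
  intro fuel
  induction fuel with
  | zero => intro i j d _ _ h; simp [dfsA] at h
  | succ fuel ih =>
    intro i j d hi hj h
    rw [dfsA_succ] at h
    split_ifs at h with hacc
    · obtain ⟨h1, h2, h3⟩ := hacc
      have e1 : i = l1.length := le_antisymm hi h1
      have e2 : j = l2.length := le_antisymm hj h2
      subst e1; subst e2; subst h3
      exact PvReach.refl _
    · rw [List.any_eq_true] at h
      obtain ⟨t, htmem, htd⟩ := h
      have hb := succsB_bounds l1 l2 i j d hi hj t htmem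
      exact PvReach.head htmem (ih t.1 t.2.1 t.2.2 hb.1 hb.2 htd)

lemma reach_imp_dfsA (l1 l2 : List Char) (s u : Nat × Nat × Int)
    (h : PvReach l1 l2 s u) (hu : u = (l1.length, l2.length, 0))
    (hi : s.1 ≤ l1.length) (hj : s.2.1 ≤ l2.length) :
    ∀ fuel, l1.length + l2.length - (s.1 + s.2.1) < fuel →
      dfsA l1 l2 fuel s.1 s.2.1 s.2.2 = true := by
  induction h with
  | refl s =>
    subst hu
    intro fuel hf
    cases fuel with
    | zero => simp at hf
    | succ fuel => rw [dfsA_succ]; simp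
  | @head s t u hst hr ih =>
    intro fuel hf
    cases fuel with
    | zero => simp at hf
    | succ fuel =>
      rw [dfsA_succ]
      split_ifs with hacc
      · rfl
      · rw [List.any_eq_true]
        refine ⟨t, hst, ?_⟩
        have hb := succsB_bounds l1 l2 s.1 s.2.1 s.2.2 hi hj t hst
        have hl := succsB_level l1 l2 s.1 s.2.1 s.2.2 t hst
        have hub : t.1 + t.2.1 ≤ l1.length + l2.length := by
          have := hb.1; have := hb.2; omega
        exact ih hu hb.1 hb.2 fuel (by omega)

-- pvAdd characterisations
lemma pvAdd_mem1 (a : List (Nat × Nat × Int) × List (Nat × Nat × Int)) (x y : Nat × Nat × Int) :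
    y ∈ (pvAdd a x).1 ↔ y ∈ a.1 ∨ y = x := by
  unfold pvAdd
  split
  · rename_i hx
    constructor
    · intro h; exact Or.inl h
    · rintro (h | rfl)
      exacts [h, hx]
  · simp

lemma pvAdd_mem2 (a : List (Nat × Nat × Int) × List (Nat × Nat × Int)) (x y : Nat × Nat × Int) :
    y ∈ (pvAdd a x).2 → y ∈ a.2 ∨ y = x := by
  unfold pvAdd; split <;> simp_all

lemma pvAdd_iff (r : List (Nat × Nat × Int)) (a : List (Nat × Nat × Int) × List (Nat × Nat × Int))
    (x : Nat × Nat × Int) (h : ∀ y, y ∈ a.1 ↔ y ∈ r ∨ y ∈ a.2) :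
    ∀ y, y ∈ (pvAdd a x).1 ↔ y ∈ r ∨ y ∈ (pvAdd a x).2 := by
  intro y; unfold pvAdd; split <;> simp_all [or_assoc]

-- inner fold (over one state's successor list)
lemma inner_mono1 (L : List (Nat × Nat × Int)) :
    ∀ a y, y ∈ a.1 → y ∈ (L.foldl pvAdd a).1 := by
  induction L with
  | nil => simp
  | cons x L ih => intro a y hy; exact ih _ _ ((pvAdd_mem1 a x y).2 (Or.inl hy))

lemma inner_absorb (L : List (Nat × Nat × Int)) :
    ∀ a y, y ∈ L → y ∈ (L.foldl pvAdd a).1 := by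
  induction L with
  | nil => simp
  | cons x L ih =>
    intro a y hy
    rcases List.mem_cons.1 hy with rfl | hy
    · exact inner_mono1 L _ _ ((pvAdd_mem1 a y y).2 (Or.inr rfl))
    · exact ih _ _ hy

lemma inner_sub2 (L : List (Nat × Nat × Int)) :
    ∀ a y, y ∈ (L.foldl pvAdd a).2 → y ∈ a.2 ∨ y ∈ L := by
  induction L with
  | nil => simp
  | cons x L ih =>
    intro a y hy
    rcases ih _ _ hy with h | h
    · rcases pvAdd_mem2 a x y h with h | rfl
      · exact Or.inl h
      · exact Or.inr (List.mem_cons_self)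
    · exact Or.inr (List.mem_cons_of_mem x h)

lemma inner_iff (r : List (Nat × Nat × Int)) (L : List (Nat × Nat × Int)) :
    ∀ a, (∀ y, y ∈ a.1 ↔ y ∈ r ∨ y ∈ a.2) →
      ∀ y, y ∈ (L.foldl pvAdd a).1 ↔ y ∈ r ∨ y ∈ (L.foldl pvAdd a).2 := by
  induction L with
  | nil => intro a h; exact h
  | cons x L ih => intro a h; exact ih _ (pvAdd_iff r a x h)

-- outer fold (over the frontier)
lemma outer_mono1 (l1 l2 : List Char) (F : List (Nat × Nat × Int)) :
    ∀ a y, y ∈ a.1 →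
      y ∈ (F.foldl (fun a st => (succsB l1 l2 st.1 st.2.1 st.2.2).foldl pvAdd a) a).1 := by
  induction F with
  | nil => simp
  | cons st F ih => intro a y hy; exact ih _ _ (inner_mono1 _ _ _ hy)

lemma outer_absorb (l1 l2 : List Char) (F : List (Nat × Nat × Int)) :
    ∀ a st t, st ∈ F → t ∈ succsB l1 l2 st.1 st.2.1 st.2.2 →
      t ∈ (F.foldl (fun a st => (succsB l1 l2 st.1 st.2.1 st.2.2).foldl pvAdd a) a).1 := by
  induction F with
  | nil => simp
  | cons x F ih =>
    intro a st t hst ht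
    rcases List.mem_cons.1 hst with rfl | hst
    · exact outer_mono1 l1 l2 F _ _ (inner_absorb _ _ _ ht)
    · exact ih _ _ _ hst ht

lemma outer_sub2 (l1 l2 : List Char) (F : List (Nat × Nat × Int)) :
    ∀ a y, y ∈ (F.foldl (fun a st => (succsB l1 l2 st.1 st.2.1 st.2.2).foldl pvAdd a) a).2 →
      y ∈ a.2 ∨ ∃ st ∈ F, y ∈ succsB l1 l2 st.1 st.2.1 st.2.2 := by
  induction F with
  | nil => simp
  | cons x F ih =>
    intro a y hy
    rcases ih _ _ hy with h | ⟨st, hst, hm⟩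
    · rcases inner_sub2 _ _ _ h with h | h
      · exact Or.inl h
      · exact Or.inr ⟨x, List.mem_cons_self, h⟩
    · exact Or.inr ⟨st, List.mem_cons_of_mem x hst, hm⟩

lemma outer_iff (l1 l2 : List Char) (r : List (Nat × Nat × Int)) (F : List (Nat × Nat × Int)) :
    ∀ a, (∀ y, y ∈ a.1 ↔ y ∈ r ∨ y ∈ a.2) →
      ∀ y, y ∈ (F.foldl (fun a st => (succsB l1 l2 st.1 st.2.1 st.2.2).foldl pvAdd a) a).1 ↔
        y ∈ r ∨ y ∈ (F.foldl (fun a st => (succsB l1 l2 st.1 st.2.1 st.2.2).foldl pvAdd a) a).2 := by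
  induction F with
  | nil => intro a h; exact h
  | cons x F ih => intro a h; exact ih _ (inner_iff r _ _ h)

-- round-level facts
lemma round_mem1 (l1 l2 : List Char) (ac : List (Nat × Nat × Int) × List (Nat × Nat × Int)) :
    ∀ y, y ∈ (bfsRound l1 l2 ac).1 ↔ y ∈ ac.1 ∨ y ∈ (bfsRound l1 l2 ac).2 := by
  intro y
  exact outer_iff l1 l2 ac.1 ac.2 (ac.1, []) (by simp) y

lemma round_prov (l1 l2 : List Char) (ac : List (Nat × Nat × Int) × List (Nat × Nat × Int)) :
    ∀ y ∈ (bfsRound l1 l2 ac).2, ∃ st ∈ ac.2, y ∈ succsB l1 l2 st.1 st.2.1 st.2.2 := by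
  intro y hy
  rcases outer_sub2 l1 l2 ac.2 (ac.1, []) y hy with h | h
  · simp at h
  · exact h

lemma round_closed (l1 l2 : List Char) (ac : List (Nat × Nat × Int) × List (Nat × Nat × Int)) :
    ∀ st ∈ ac.2, ∀ t ∈ succsB l1 l2 st.1 st.2.1 st.2.2, t ∈ (bfsRound l1 l2 ac).1 := by
  intro st hst t ht
  exact outer_absorb l1 l2 ac.2 (ac.1, []) st t hst ht

lemma round_mono (l1 l2 : List Char) (ac : List (Nat × Nat × Int) × List (Nat × Nat × Int)) :
    ∀ y ∈ ac.1, y ∈ (bfsRound l1 l2 ac).1 := by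
  intro y hy; exact outer_mono1 l1 l2 ac.2 (ac.1, []) y hy

-- the BFS invariant, after k rounds
def PvInv (l1 l2 : List Char) (k : Nat) (ac : List (Nat × Nat × Int) × List (Nat × Nat × Int)) : Prop :=
  ((0, 0, (0 : Int)) ∈ ac.1) ∧
  (∀ s ∈ ac.1, PvReach l1 l2 (0, 0, 0) s) ∧
  (∀ s ∈ ac.1, s ∉ ac.2 → ∀ t ∈ succsB l1 l2 s.1 s.2.1 s.2.2, t ∈ ac.1) ∧
  (∀ s ∈ ac.2, s ∈ ac.1) ∧
  (∀ s ∈ ac.2, k ≤ s.1 + s.2.1) ∧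
  (∀ s ∈ ac.1, s.1 ≤ l1.length ∧ s.2.1 ≤ l2.length)

lemma pvInv_zero (l1 l2 : List Char) :
    PvInv l1 l2 0 ([(0, 0, (0 : Int))], [(0, 0, (0 : Int))]) := by
  refine ⟨by simp, ?_, ?_, by simp, by simp, by simp⟩
  · intro s hs; simp at hs; subst hs; exact PvReach.refl _
  · intro s hs hns; simp at hs; simp [hs] at hns

lemma pvInv_step (l1 l2 : List Char) (k : Nat) (ac : List (Nat × Nat × Int) × List (Nat × Nat × Int))
    (h : PvInv l1 l2 k ac) : PvInv l1 l2 (k + 1) (bfsRound l1 l2 ac) := by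
  obtain ⟨h0, hreach, hclosed, hfr, hlev, hbd⟩ := h
  refine ⟨round_mono l1 l2 ac _ h0, ?_, ?_, ?_, ?_, ?_⟩
  · intro s hs
    rcases (round_mem1 l1 l2 ac s).1 hs with h | h
    · exact hreach s h
    · obtain ⟨st, hst, hm⟩ := round_prov l1 l2 ac s h
      exact (hreach st (hfr st hst)).snoc hm
  · intro s hs hns t ht
    rcases (round_mem1 l1 l2 ac s).1 hs with h | h
    · by_cases hsf : s ∈ ac.2
      · exact round_closed l1 l2 ac s hsf t ht
      · exact round_mono l1 l2 ac t (hclosed s h hsf t ht)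
    · exact absurd h hns
  · intro s hs; exact (round_mem1 l1 l2 ac s).2 (Or.inr hs)
  · intro s hs
    obtain ⟨st, hst, hm⟩ := round_prov l1 l2 ac s hs
    have := succsB_level l1 l2 st.1 st.2.1 st.2.2 s hm
    have := hlev st hst
    omega
  · intro s hs
    rcases (round_mem1 l1 l2 ac s).1 hs with h | h
    · exact hbd s h
    · obtain ⟨st, hst, hm⟩ := round_prov l1 l2 ac s h
      have hstb := hbd st (hfr st hst)
      exact succsB_bounds l1 l2 st.1 st.2.1 st.2.2 hstb.1 hstb.2 s hm

lemma foldl_const_iterate {α σ : Type} (g : σ → σ) :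
    ∀ (l : List α) (init : σ), l.foldl (fun a _ => g a) init = g^[l.length] init := by
  intro l
  induction l with
  | nil => simp
  | cons x l ih => intro init; simp [List.foldl_cons, ih, Function.iterate_succ_apply]

lemma pvInv_iterate (l1 l2 : List Char) (k : Nat) :
    PvInv l1 l2 k ((bfsRound l1 l2)^[k] ([(0, 0, (0 : Int))], [(0, 0, (0 : Int))])) := by
  induction k with
  | zero => exact pvInv_zero l1 l2
  | succ k ih => rw [Function.iterate_succ_apply']; exact pvInv_step l1 l2 k _ ih

lemma reach_mem_of_closed (l1 l2 : List Char) (r : List (Nat × Nat × Int))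
    (hc : ∀ s ∈ r, ∀ t ∈ succsB l1 l2 s.1 s.2.1 s.2.2, t ∈ r) :
    ∀ s u, PvReach l1 l2 s u → s ∈ r → u ∈ r := by
  intro s u h
  induction h with
  | refl s => exact id
  | head hst _ ih => intro hs; exact ih (hc _ hs _ hst)

lemma main_eq (l1 l2 : List Char) :
    dfsA l1 l2 (l1.length + l2.length + 1) 0 0 0 =
      decide ((l1.length, l2.length, (0 : Int)) ∈
        ((List.range (l1.length + l2.length + 1)).foldl (fun a _ => bfsRound l1 l2 a)
          ([((0 : Nat), (0 : Nat), (0 : Int))], [((0 : Nat), (0 : Nat), (0 : Int))])).1) := by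
  rw [foldl_const_iterate (bfsRound l1 l2)]
  rw [List.length_range]
  obtain ⟨h0, hreach, hclosed, hfr, hlev, hbd⟩ :=
    pvInv_iterate l1 l2 (l1.length + l2.length + 1)
  set r := ((bfsRound l1 l2)^[l1.length + l2.length + 1]
      ([(0, 0, (0 : Int))], [(0, 0, (0 : Int))])) with hr
  have hfempty : ∀ s ∈ r.2, False := by
    intro s hs
    have h1 := hlev s hs
    have h2 := hbd s (hfr s hs)
    omega
  have hcl : ∀ s ∈ r.1, ∀ t ∈ succsB l1 l2 s.1 s.2.1 s.2.2, t ∈ r.1 := by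
    intro s hs t ht
    exact hclosed s hs (fun hf => hfempty s hf) t ht
  cases hd : dfsA l1 l2 (l1.length + l2.length + 1) 0 0 0 with
  | true =>
    have hre := dfsA_imp_reach l1 l2 (l1.length + l2.length + 1) 0 0 0
      (Nat.zero_le _) (Nat.zero_le _) hd
    have := reach_mem_of_closed l1 l2 r.1 hcl _ _ hre h0
    simp [this]
  | false =>
    symm
    rw [decide_eq_false_iff_not]
    intro hmem
    have hre := hreach _ hmem
    have := reach_imp_dfsA l1 l2 (0, 0, 0) (l1.length, l2.length, 0) hre rfl
      (Nat.zero_le _) (Nat.zero_le _) (l1.length + l2.length + 1) (by omega)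
    rw [this] at hd
    simp at hd

-- ===== VERDICT (by name: the statement is the Claim_ definition above) =====
theorem possiblyEquals_spec : Claim_equal_possiblyEquals := by
  intro s1 s2 _
  unfold Spec_possiblyEquals possiblyEquals possiblyEquals_alt
  by_cases h : s1 = s2
  · simp [h]
  · simp only [h, if_false]
    exact main_eq s1.toList s2.toList
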